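-- pv_equiv track=rewrite | github.com/JJangCoders/Algorithm-Study | ByteAurora/20230727/1303.py | calculate_army_power
-- ===== SOURCE A (Python) =====
-- from collections import deque
--
-- directions = [(0, 1),  # RIGHT
--               (1, 0),  # DOWN
--               (0, -1),  # LEFT
--               (-1, 0)]  # UP
--
-- def count_adjacent_soldiers(game_map, width, height, y, x, checked_positions):
--     queue = deque([(y, x)])
--     checked_positions[y][x] = True
--     count = 1
--
--     while queue:
--         y, x = queue.popleft()
--
--         for y_direction, x_direction in directions:
--             new_x = x + x_direction
--             new_y = y + y_direction
--
--             if 0 <= new_x < width and 0 <= new_y < height and \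
--                     not checked_positions[new_y][new_x] and \
--                     game_map[new_y][new_x] == game_map[y][x]:
--                 queue.append((new_y, new_x))
--                 checked_positions[new_y][new_x] = True
--                 count += 1
--
--     return count
--
-- def calculate_army_power(width, height, game_map):
--     checked_positions = [[False] * width for _ in range(height)]
--
--     my_army_power = 0
--     enemy_army_power = 0
--
--     for y in range(height):
--         for x in range(width):
--             if not checked_positions[y][x]:
--                 group_member = count_adjacent_soldiers(game_map, width, height, y, x, checked_positions)
--                 if game_map[y][x] == 'W':
--                     my_army_power += group_member ** 2
--                 elif game_map[y][x] == 'B':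
--                     enemy_army_power += group_member ** 2
--
--     return my_army_power, enemy_army_power
-- ===== SOURCE B (Python) =====
-- def calculate_army_power(width, height, game_map):
--     if width <= 0 or height <= 0:
--         return 0, 0
--
--     parent = list(range(width * height))
--
--     def find(i):
--         while parent[i] != i:
--             i = parent[i]
--         return i
--
--     for y in range(height):
--         for x in range(width):
--             for ny, nx in ((y, x + 1), (y + 1, x)):
--                 if ny < height and nx < width and game_map[ny][nx] == game_map[y][x]:
--                     ra, rb = find(y * width + x), find(ny * width + nx)
--                     if ra != rb:
--                         if ra < rb:
--                             parent[rb] = ra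
--                         else:
--                             parent[ra] = rb
--
--     count = [0] * (width * height)
--     for y in range(height):
--         for x in range(width):
--             count[find(y * width + x)] += 1
--
--     my_army_power = 0
--     enemy_army_power = 0
--     for y in range(height):
--         for x in range(width):
--             i = y * width + x
--             if find(i) == i:
--                 if game_map[y][x] == 'W':
--                     my_army_power += count[i] * count[i]
--                 elif game_map[y][x] == 'B':
--                     enemy_army_power += count[i] * count[i]
--     return my_army_power, enemy_army_power
-- ===== Notes on version B (the rewrite author's own statement) =====
-- stated objective: alternative
-- what changed: Replaces the per-component BFS flood fill over a visited matrix by a disjoint-set union (union-find) over cell indices y*width+x: one pass unions each cell with its right/down same-letter neighbour (smaller root wins), a second pass tallies component sizes per root, and a final pass adds size^2 at each root cell by its letter.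
import Mathlib
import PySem

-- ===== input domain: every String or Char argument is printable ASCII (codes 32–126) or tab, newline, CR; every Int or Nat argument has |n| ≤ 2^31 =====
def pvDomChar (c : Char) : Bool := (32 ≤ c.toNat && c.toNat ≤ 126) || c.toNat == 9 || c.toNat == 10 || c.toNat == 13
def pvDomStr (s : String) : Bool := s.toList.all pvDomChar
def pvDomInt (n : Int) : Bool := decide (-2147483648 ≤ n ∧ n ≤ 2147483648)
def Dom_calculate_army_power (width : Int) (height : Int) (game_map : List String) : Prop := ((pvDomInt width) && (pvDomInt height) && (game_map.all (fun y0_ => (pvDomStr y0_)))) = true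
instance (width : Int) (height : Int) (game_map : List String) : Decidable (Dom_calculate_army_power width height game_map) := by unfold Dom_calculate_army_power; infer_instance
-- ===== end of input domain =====

-- B replaces the per-component deque BFS over a 2D boolean matrix by a disjoint-set union
-- (union-find) over cell indices y*width+x (objective: alternative; return value only).

-- shared grid accessor: game_map[y][x]; the .getD default is never reached under Pre_ (indices in range)
def pvCell (gm : List String) (y x : Int) : Char :=
  (PySem.Str.pyGet? (PySem.List.pyGetD gm y "") x).getD 'A'

-- ===== PORT A =====
def pvGet2d (m : List (List Bool)) (y x : Int) : Bool :=
  PySem.List.pyGetD (PySem.List.pyGetD m y []) x false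

def pvSet2d (m : List (List Bool)) (y x : Int) : List (List Bool) :=
  PySem.List.pySetD m y (PySem.List.pySetD (PySem.List.pyGetD m y []) x true)

def pvDirections : List (Int × Int) := [(0,1),(1,0),(0,-1),(-1,0)]

-- body of A's while-loop for the popped cell (y,x), folded over pvDirections
def pvVisitA (gm : List String) (w h : Int) (y x : Int)
    (st : List (List Bool) × List (Int × Int) × Int) (d : Int × Int) :
    List (List Bool) × List (Int × Int) × Int :=
  let nx := x + d.2
  let ny := y + d.1
  if 0 ≤ nx ∧ nx < w ∧ 0 ≤ ny ∧ ny < h ∧ pvGet2d st.1 ny nx = false ∧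
      pvCell gm ny nx = pvCell gm y x then
    (pvSet2d st.1 ny nx, st.2.1 ++ [(ny, nx)], st.2.2 + 1)
  else st

-- A's while-queue loop; fuel only makes the recursion structural (never exhausted: see pvBfsA_spec)
def pvBfsA (gm : List String) (w h : Int) :
    Nat → List (List Bool) → List (Int × Int) → Int → Int × List (List Bool)
  | 0, checked, _, count => (count, checked)
  | _ + 1, checked, [], count => (count, checked)
  | fuel + 1, checked, (y, x) :: rest, count =>
      let st := List.foldl (pvVisitA gm w h y x) (checked, rest, count) pvDirections
      pvBfsA gm w h fuel st.1 st.2.1 st.2.2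

-- returns (count, mutated checked_positions)
def count_adjacent_soldiers (gm : List String) (w h : Int) (y x : Int)
    (checked : List (List Bool)) : Int × List (List Bool) :=
  pvBfsA gm w h (2 * w.toNat * h.toNat + 1) (pvSet2d checked y x) [(y, x)] 1

-- the body of A's inner (per-cell) loop
def pvAStep (gm : List String) (w h y x : Int) (st : List (List Bool) × Int × Int) :
    List (List Bool) × Int × Int :=
  if pvGet2d st.1 y x = false then
    let r := count_adjacent_soldiers gm w h y x st.1
    if pvCell gm y x = 'W' then (r.2, st.2.1 + r.1 ^ 2, st.2.2)
    else if pvCell gm y x = 'B' then (r.2, st.2.1, st.2.2 + r.1 ^ 2)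
    else (r.2, st.2.1, st.2.2)
  else st

def calculate_army_power (width : Int) (height : Int) (game_map : List String) : Int × Int :=
  let checked0 := (PySem.List.pyRange 0 height 1).map (fun _ => List.replicate width.toNat false)
  let res := (PySem.List.pyRange 0 height 1).foldl (fun st y =>
      (PySem.List.pyRange 0 width 1).foldl (fun st x =>
        pvAStep game_map width height y x st) st) (checked0, (0 : Int), (0 : Int))
  (res.2.1, res.2.2)

-- ===== PORT B =====
-- B's find: 'while parent[i] != i: i = parent[i]'; the fuel parent.length only makes the
-- recursion structural (under the union invariant parent[i] ≤ i it is never exhausted),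
-- and the pyGetD default i is unreachable for the in-range indices B passes
def pvFind (parent : List Int) : Nat → Int → Int
  | 0, i => i
  | fuel + 1, i =>
      let p := PySem.List.pyGetD parent i i
      if p ≠ i then pvFind parent fuel p else i

def pvUnion (parent : List Int) (a b : Int) : List Int :=
  let ra := pvFind parent parent.length a
  let rb := pvFind parent parent.length b
  if ra ≠ rb then
    if ra < rb then PySem.List.pySetD parent rb ra
    else PySem.List.pySetD parent ra rb
  else parent

-- one candidate neighbour q of (y,x) in B's union pass
def pvUStep (gm : List String) (w h y x : Int) (parent : List Int) (q : Int × Int) : List Int :=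
  if q.1 < h ∧ q.2 < w ∧ pvCell gm q.1 q.2 = pvCell gm y x then
    pvUnion parent (y * w + x) (q.1 * w + q.2)
  else parent

def pvParentF (gm : List String) (w h : Int) : List Int :=
  (PySem.List.pyRange 0 h 1).foldl (fun par y =>
      (PySem.List.pyRange 0 w 1).foldl (fun par x =>
        [(y, x + 1), (y + 1, x)].foldl (pvUStep gm w h y x) par) par)
    (PySem.List.pyRange 0 (w * h) 1)

def pvCountF (gm : List String) (w h : Int) : List Int :=
  let parent := pvParentF gm w h
  (PySem.List.pyRange 0 h 1).foldl (fun cnt y =>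
      (PySem.List.pyRange 0 w 1).foldl (fun cnt x =>
        let r := pvFind parent parent.length (y * w + x)
        PySem.List.pySetD cnt r (PySem.List.pyGetD cnt r 0 + 1)) cnt)
    (List.replicate (w * h).toNat 0)

-- the body of B's final (per-cell) accumulation loop
def pvBStep (gm : List String) (w : Int) (parent count : List Int) (y x : Int)
    (st : Int × Int) : Int × Int :=
  let i := y * w + x
  if pvFind parent parent.length i = i then
    if pvCell gm y x = 'W' then
      (st.1 + PySem.List.pyGetD count i 0 * PySem.List.pyGetD count i 0, st.2)
    else if pvCell gm y x = 'B' then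
      (st.1, st.2 + PySem.List.pyGetD count i 0 * PySem.List.pyGetD count i 0)
    else st
  else st

def calculate_army_power_alt (width : Int) (height : Int) (game_map : List String) : Int × Int :=
  if width ≤ 0 ∨ height ≤ 0 then (0, 0)
  else
    let parent := pvParentF game_map width height
    let count := pvCountF game_map width height
    (PySem.List.pyRange 0 height 1).foldl (fun st y =>
        (PySem.List.pyRange 0 width 1).foldl (fun st x =>
          pvBStep game_map width parent count y x st) st)
      ((0 : Int), (0 : Int))

-- ===== PRECONDITION & SPEC =====
-- Pre_ excludes exactly the inputs where Python raises IndexError: a positive grid whose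
-- declared height exceeds len(game_map) or one of the first `height` rows is shorter than `width`.
def Pre_calculate_army_power (width : Int) (height : Int) (game_map : List String) : Prop :=
  (0 < width ∧ 0 < height) →
    (height ≤ (game_map.length : Int) ∧
      ∀ row ∈ game_map.take height.toNat, width ≤ PySem.Str.len row)

instance (width : Int) (height : Int) (game_map : List String) : Decidable (Pre_calculate_army_power width height game_map) := by unfold Pre_calculate_army_power; infer_instance

def pvWitness_calculate_army_power : Int × Int × List String := (2, 2, ["WB", "WW"])

def Spec_calculate_army_power (width : Int) (height : Int) (game_map : List String) (out : Int × Int) : Prop := out = calculate_army_power_alt width height game_map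
instance (width : Int) (height : Int) (game_map : List String) (out : Int × Int) : Decidable (Spec_calculate_army_power width height game_map out) := by unfold Spec_calculate_army_power; infer_instance

-- ===== CLAIM (what is proved, stated in full; the proofs are below) =====
def Claim_equal_calculate_army_power : Prop := ∀ (width : Int) (height : Int) (game_map : List String), Dom_calculate_army_power width height game_map → Pre_calculate_army_power width height game_map → Spec_calculate_army_power width height game_map (calculate_army_power width height game_map)

-- ===== LEMMAS AND PROOFS =====

-- the same-letter 4-adjacency graph both programs explore
def pvInG (w h : Int) (p : Int × Int) : Prop := 0 ≤ p.1 ∧ p.1 < h ∧ 0 ≤ p.2 ∧ p.2 < w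

def pvAdj (gm : List String) (w h : Int) (p q : Int × Int) : Prop :=
  pvInG w h p ∧ pvInG w h q ∧ (q.1 - p.1, q.2 - p.2) ∈ pvDirections ∧
    pvCell gm q.1 q.2 = pvCell gm p.1 p.2

def pvReach (gm : List String) (w h : Int) (s p : Int × Int) : Prop :=
  Relation.ReflTransGen (pvAdj gm w h) s p

lemma pvAdj_symm (gm : List String) (w h : Int) : Symmetric (pvAdj gm w h) := by
  rintro p q ⟨hp, hq, hd, hc⟩
  refine ⟨hq, hp, ?_, hc.symm⟩
  simp only [pvDirections, List.mem_cons, List.not_mem_nil, or_false, Prod.mk.injEq] at hd ⊢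
  omega

lemma pvReach_inG (gm : List String) (w h : Int) {s p : Int × Int}
    (hs : pvInG w h s) (h' : pvReach gm w h s p) : pvInG w h p := by
  induction h' with
  | refl => exact hs
  | tail _ hadj _ => exact hadj.2.1

lemma pvReach_not_mem (gm : List String) (w h : Int) {V0 : Finset (Int × Int)} {s p : Int × Int}
    (hC : ∀ a ∈ V0, ∀ b, pvAdj gm w h a b → b ∈ V0) (hs : s ∉ V0)
    (h' : pvReach gm w h s p) : p ∉ V0 := by
  intro hp
  have hps : Relation.ReflTransGen (pvAdj gm w h) p s :=
    Relation.ReflTransGen.symmetric (pvAdj_symm gm w h) h'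
  have key : ∀ a b : Int × Int, Relation.ReflTransGen (pvAdj gm w h) a b → a ∈ V0 → b ∈ V0 := by
    intro a b hab
    induction hab with
    | refl => exact id
    | tail _ hadj ih => exact fun ha => hC _ (ih ha) _ hadj
  exact hs (key p s hps hp)

-- a closed over-approximation containing s contains everything reachable from s
lemma pvReach_subset (gm : List String) (w h : Int) {V0 M : Finset (Int × Int)} {s : Int × Int}
    (hC0 : ∀ a ∈ V0, ∀ b, pvAdj gm w h a b → b ∈ V0) (hs0 : s ∉ V0) (hsM : s ∈ M)
    (hM : ∀ a ∈ M, ∀ b, pvAdj gm w h a b → b ∈ V0 ∪ M) :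
    ∀ p, pvReach gm w h s p → p ∈ M := by
  intro p hr
  induction hr with
  | refl => exact hsM
  | @tail b c hab hbc ih =>
      rcases Finset.mem_union.mp (hM b ih c hbc) with hv | hm
      · exact absurd hv (pvReach_not_mem gm w h hC0 hs0 (hab.tail hbc))
      · exact hm

def pvGridF (w h : Int) : Finset (Int × Int) :=
  (Finset.range h.toNat ×ˢ Finset.range w.toNat).image (fun ab => ((ab.1 : Int), (ab.2 : Int)))

lemma pvMem_gridF (w h : Int) (p : Int × Int) : p ∈ pvGridF w h ↔ pvInG w h p := by
  simp only [pvGridF, Finset.mem_image, Finset.mem_product, Finset.mem_range, pvInG]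
  constructor
  · rintro ⟨⟨a, b⟩, ⟨ha, hb⟩, rfl⟩
    simp only []
    omega
  · rintro ⟨h1, h2, h3, h4⟩
    refine ⟨(p.1.toNat, p.2.toNat), ⟨by omega, by omega⟩, ?_⟩
    simp only [Prod.ext_iff]
    omega

lemma pvCard_gridF (w h : Int) : (pvGridF w h).card = h.toNat * w.toNat := by
  rw [pvGridF, Finset.card_image_of_injective _ (fun a b hab => ?_), Finset.card_product,
    Finset.card_range, Finset.card_range]
  simp only [Prod.ext_iff] at hab ⊢
  omega

-- A's checked_positions matrix represents the visited set V
def pvRepA (w h : Int) (m : List (List Bool)) (V : Finset (Int × Int)) : Prop :=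
  m.length = h.toNat ∧ (∀ r ∈ m, r.length = w.toNat) ∧
    ∀ p : Int × Int, pvInG w h p → (pvGet2d m p.1 p.2 = true ↔ p ∈ V)

lemma pvGet2d_eq (m : List (List Bool)) (y x : Int) (hy : 0 ≤ y) (hx : 0 ≤ x) :
    pvGet2d m y x = ((m[y.toNat]?.getD [])[x.toNat]?).getD false := by
  rw [pvGet2d, PySem.List.pyGetD_of_nonneg _ _ hy, PySem.List.pyGetD_of_nonneg _ _ hx,
    List.getD_eq_getElem?_getD, List.getD_eq_getElem?_getD]

lemma pvSet2d_eq (m : List (List Bool)) (y x : Int) (hy : 0 ≤ y) (hx : 0 ≤ x) :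
    pvSet2d m y x = m.set y.toNat ((m[y.toNat]?.getD []).set x.toNat true) := by
  rw [pvSet2d, PySem.List.pySetD_of_nonneg _ _ hy, PySem.List.pySetD_of_nonneg _ _ hx,
    PySem.List.pyGetD_of_nonneg _ _ hy, List.getD_eq_getElem?_getD]

lemma pvRepA_init (w h : Int) :
    pvRepA w h (List.replicate h.toNat (List.replicate w.toNat false)) ∅ := by
  refine ⟨List.length_replicate, fun r hr => ?_, fun p hp => ?_⟩
  · rw [List.eq_of_mem_replicate hr]; exact List.length_replicate
  · obtain ⟨h1, h2, h3, h4⟩ := hp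
    rw [pvGet2d_eq _ _ _ h1 h3]
    rw [List.getElem?_replicate]
    have hy : p.1.toNat < h.toNat := by omega
    have hx : p.2.toNat < w.toNat := by omega
    simp [hy, hx]

lemma pvSet2d_shape (w h : Int) (m : List (List Bool)) (y x : Int)
    (h1 : m.length = h.toNat) (h2 : ∀ r ∈ m, r.length = w.toNat) (hp : pvInG w h (y, x)) :
    (pvSet2d m y x).length = h.toNat ∧ ∀ r ∈ pvSet2d m y x, r.length = w.toNat := by
  obtain ⟨g1, g2, g3, g4⟩ := hp
  rw [pvSet2d_eq _ _ _ g1 g3]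
  refine ⟨by rw [List.length_set]; exact h1, fun r hr => ?_⟩
  rcases List.mem_or_eq_of_mem_set hr with hr | rfl
  · exact h2 r hr
  · have hy : y.toNat < m.length := by omega
    rw [List.length_set]
    rw [List.getElem?_eq_getElem hy]
    exact h2 _ (List.getElem_mem hy)

lemma pvGet2d_set2d (w h : Int) (m : List (List Bool)) (q p : Int × Int)
    (h1 : m.length = h.toNat) (h2 : ∀ r ∈ m, r.length = w.toNat)
    (hq : pvInG w h q) (hp : pvInG w h p) :
    pvGet2d (pvSet2d m q.1 q.2) p.1 p.2 = if p = q then true else pvGet2d m p.1 p.2 := by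
  obtain ⟨g1, g2, g3, g4⟩ := hq
  obtain ⟨f1, f2, f3, f4⟩ := hp
  have hylt : q.1.toNat < m.length := by omega
  have hrowlen : (m[q.1.toNat]?.getD []).length = w.toNat := by
    rw [List.getElem?_eq_getElem hylt]
    exact h2 _ (List.getElem_mem hylt)
  rw [pvGet2d_eq _ _ _ f1 f3, pvSet2d_eq _ _ _ g1 g3]
  by_cases hy : p.1 = q.1
  · have hyn : p.1.toNat = q.1.toNat := by omega
    rw [hyn, List.getElem?_set_self hylt, Option.getD_some]
    by_cases hx : p.2 = q.2
    · have hx' : p.2.toNat = q.2.toNat := by omega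
      rw [if_pos (Prod.ext hy hx), hx', List.getElem?_set_self (by omega), Option.getD_some]
    · have hpq : p ≠ q := fun hc => hx (by rw [hc])
      have hx' : q.2.toNat ≠ p.2.toNat := by omega
      simp only [if_neg hpq]
      rw [List.getElem?_set_ne hx', pvGet2d_eq _ _ _ f1 f3, hyn]
  · have hpq : p ≠ q := fun hc => hy (by rw [hc])
    have hy' : p.1.toNat ≠ q.1.toNat := by omega
    rw [List.getElem?_set_ne (fun hc => hy' hc.symm), if_neg hpq, pvGet2d_eq _ _ _ f1 f3]

lemma pvRepA_insert (w h : Int) (m : List (List Bool)) (V : Finset (Int × Int)) (q : Int × Int)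
    (hR : pvRepA w h m V) (hq : pvInG w h q) :
    pvRepA w h (pvSet2d m q.1 q.2) (insert q V) := by
  obtain ⟨h1, h2, h3⟩ := hR
  obtain ⟨s1, s2⟩ := pvSet2d_shape w h m q.1 q.2 h1 h2 (by exact hq)
  refine ⟨s1, s2, fun p hp => ?_⟩
  rw [pvGet2d_set2d w h m q p h1 h2 hq hp]
  by_cases hpq : p = q
  · simp [hpq]
  · simp only [if_neg hpq, Finset.mem_insert, h3 p hp]
    exact ⟨Or.inr, fun hc => hc.resolve_left hpq⟩

lemma pvFoldA (gm : List String) (w h : Int) (V0 : Finset (Int × Int)) (s p0 : Int × Int)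
    (hV0C : ∀ a ∈ V0, ∀ b, pvAdj gm w h a b → b ∈ V0)
    (hV0G : ∀ p ∈ V0, pvInG w h p)
    (hs : pvInG w h s) (hp0r : pvReach gm w h s p0) :
    ∀ (l : List (Int × Int)), (∀ d ∈ l, d ∈ pvDirections) →
    ∀ (checked : List (List Bool)) (Q : List (Int × Int)) (count : Int)
      (M : Finset (Int × Int)),
      pvRepA w h checked (V0 ∪ M) → (∀ p ∈ M, pvReach gm w h s p) → (∀ p ∈ Q, p ∈ M) →
      (∀ p ∈ M, p ∉ Q → p ≠ p0 → ∀ q, pvAdj gm w h p q → q ∈ V0 ∪ M) →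
      ∃ M' : Finset (Int × Int), M ⊆ M' ∧
        (∀ p ∈ M', pvReach gm w h s p) ∧
        (let st' := List.foldl (pvVisitA gm w h p0.1 p0.2) (checked, Q, count) l
         pvRepA w h st'.1 (V0 ∪ M') ∧ (∀ p ∈ st'.2.1, p ∈ M') ∧
         (∀ p ∈ M', p ∉ st'.2.1 → p ≠ p0 → ∀ q, pvAdj gm w h p q → q ∈ V0 ∪ M') ∧
         st'.2.2 - M'.card = count - M.card ∧
         2 * (h.toNat * w.toNat - (V0 ∪ M').card) + st'.2.1.length ≤
           2 * (h.toNat * w.toNat - (V0 ∪ M).card) + Q.length ∧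
         (∀ d ∈ l, ∀ q : Int × Int, pvAdj gm w h p0 q →
            q.1 - p0.1 = d.1 → q.2 - p0.2 = d.2 → q ∈ V0 ∪ M')) := by
  have hp0G : pvInG w h p0 := pvReach_inG gm w h hs hp0r
  intro l
  induction l with
  | nil =>
      intro _ checked Q count M hRep hMr hQM hCl
      exact ⟨M, Finset.Subset.refl M, hMr, hRep, hQM, fun p hp hp1 hp2 => hCl p hp hp1 hp2,
        by simp, le_refl _, by simp⟩
  | cons d t ih =>
      intro hld checked Q count M hRep hMr hQM hCl
      have hd : d ∈ pvDirections := hld d List.mem_cons_self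
      have hsub : (V0 ∪ M) ⊆ pvGridF w h := by
        intro p hp
        rcases Finset.mem_union.mp hp with hp | hp
        · exact (pvMem_gridF w h p).mpr (hV0G p hp)
        · exact (pvMem_gridF w h p).mpr (pvReach_inG gm w h hs (hMr p hp))
      rw [List.foldl_cons]
      by_cases hcond : 0 ≤ p0.2 + d.2 ∧ p0.2 + d.2 < w ∧ 0 ≤ p0.1 + d.1 ∧ p0.1 + d.1 < h ∧
          pvGet2d checked (p0.1 + d.1) (p0.2 + d.2) = false ∧
          pvCell gm (p0.1 + d.1) (p0.2 + d.2) = pvCell gm p0.1 p0.2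
      · -- the neighbour is marked and enqueued
        set q : Int × Int := (p0.1 + d.1, p0.2 + d.2) with hqdef
        have hq1 : q.1 = p0.1 + d.1 := rfl
        have hq2 : q.2 = p0.2 + d.2 := rfl
        have hstep : pvVisitA gm w h p0.1 p0.2 (checked, Q, count) d =
            (pvSet2d checked q.1 q.2, Q ++ [q], count + 1) := by
          simp only [pvVisitA, hqdef]
          rw [if_pos hcond]
        have hqG : pvInG w h q := ⟨by omega, by omega, by omega, by omega⟩
        have hqnot : q ∉ V0 ∪ M := by
          intro hqmem
          have := (hRep.2.2 q hqG).mpr hqmem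
          rw [hcond.2.2.2.2.1] at this
          exact Bool.false_ne_true this
        have hadj : pvAdj gm w h p0 q := by
          refine ⟨hp0G, hqG, ?_, hcond.2.2.2.2.2⟩
          have : (q.1 - p0.1, q.2 - p0.2) = d := by
            simp only [hqdef]
            exact Prod.ext (by omega) (by omega)
          rwa [this]
        have hqr : pvReach gm w h s q := hp0r.tail hadj
        have hqM : q ∉ M := fun hc => hqnot (Finset.mem_union_right _ hc)
        have hunion : V0 ∪ insert q M = insert q (V0 ∪ M) := Finset.union_insert q V0 M
        have hcard : (V0 ∪ insert q M).card = (V0 ∪ M).card + 1 := by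
          rw [hunion, Finset.card_insert_of_notMem hqnot]
        have hcardM : (insert q M).card = M.card + 1 := Finset.card_insert_of_notMem hqM
        have hle : (V0 ∪ M).card + 1 ≤ h.toNat * w.toNat := by
          have : insert q (V0 ∪ M) ⊆ pvGridF w h := by
            intro p hp
            rcases Finset.mem_insert.mp hp with rfl | hp
            · exact (pvMem_gridF w h q).mpr hqG
            · exact hsub hp
          have := Finset.card_le_card this
          rwa [Finset.card_insert_of_notMem hqnot, pvCard_gridF] at this
        have hRep1 : pvRepA w h (pvSet2d checked q.1 q.2) (V0 ∪ insert q M) := by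
          rw [hunion]
          exact pvRepA_insert w h checked (V0 ∪ M) q hRep hqG
        have hMr1 : ∀ p ∈ insert q M, pvReach gm w h s p := by
          intro p hp
          rcases Finset.mem_insert.mp hp with rfl | hp
          · exact hqr
          · exact hMr p hp
        have hQM1 : ∀ p ∈ Q ++ [q], p ∈ insert q M := by
          intro p hp
          rcases List.mem_append.mp hp with hp | hp
          · exact Finset.mem_insert_of_mem (hQM p hp)
          · rw [List.mem_singleton.mp hp]; exact Finset.mem_insert_self q M
        have hCl1 : ∀ p ∈ insert q M, p ∉ Q ++ [q] → p ≠ p0 → ∀ r, pvAdj gm w h p r →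
            r ∈ V0 ∪ insert q M := by
          intro p hp hpQ hpp0 r hr
          have hpq : p ≠ q := by
            intro hc; exact hpQ (by rw [hc]; exact List.mem_append_right _ (List.mem_singleton_self q))
          have hpM : p ∈ M := (Finset.mem_insert.mp hp).resolve_left hpq
          have hpQ' : p ∉ Q := fun hc => hpQ (List.mem_append_left _ hc)
          have := hCl p hpM hpQ' hpp0 r hr
          rw [hunion]
          exact Finset.mem_insert_of_mem this
        obtain ⟨M', hMM', hMr', hrest⟩ :=
          ih (fun e he => hld e (List.mem_cons_of_mem _ he)) (pvSet2d checked q.1 q.2)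
            (Q ++ [q]) (count + 1) (insert q M) hRep1 hMr1 hQM1 hCl1
        refine ⟨M', Finset.Subset.trans (Finset.subset_insert q M) hMM', hMr', ?_⟩
        rw [hstep]
        simp only at hrest ⊢
        obtain ⟨r1, r2, r3, r4, r5, r6⟩ := hrest
        refine ⟨r1, r2, r3, by push_cast at r4 ⊢; omega, ?_, ?_⟩
        · refine le_trans r5 ?_
          rw [hcard, List.length_append, List.length_singleton]
          omega
        · intro e he q' hq' h1 h2
          rcases List.mem_cons.mp he with rfl | he
          · have hq'q : q' = q := Prod.ext (by omega) (by omega)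
            rw [hq'q]
            have : q ∈ V0 ∪ insert q M := Finset.mem_union_right _ (Finset.mem_insert_self q M)
            exact Finset.union_subset_union (Finset.Subset.refl V0) hMM' this
          · exact r6 e he q' hq' h1 h2
      · -- nothing happens at this direction
        have hstep : pvVisitA gm w h p0.1 p0.2 (checked, Q, count) d = (checked, Q, count) := by
          simp only [pvVisitA]
          rw [if_neg hcond]
        obtain ⟨M', hMM', hMr', hrest⟩ :=
          ih (fun e he => hld e (List.mem_cons_of_mem _ he)) checked Q count M hRep hMr hQM hCl
        refine ⟨M', hMM', hMr', ?_⟩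
        rw [hstep]
        simp only at hrest ⊢
        obtain ⟨r1, r2, r3, r4, r5, r6⟩ := hrest
        refine ⟨r1, r2, r3, r4, r5, ?_⟩
        intro e he q' hq' h1 h2
        rcases List.mem_cons.mp he with rfl | he
        · -- the guard failed, so this neighbour was already visited
          have hq'1 : q'.1 = p0.1 + e.1 := by omega
          have hq'2 : q'.2 = p0.2 + e.2 := by omega
          have hget : pvGet2d checked q'.1 q'.2 = true := by
            by_contra hc
            have hfalse : pvGet2d checked q'.1 q'.2 = false := by
              cases hb : pvGet2d checked q'.1 q'.2
              · rfl
              · exact absurd hb hc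
            apply hcond
            obtain ⟨_, hq'G, _, hcell⟩ := hq'
            rw [← hq'1, ← hq'2]
            exact ⟨by obtain ⟨a1,a2,a3,a4⟩ := hq'G; omega,
              by obtain ⟨a1,a2,a3,a4⟩ := hq'G; omega,
              by obtain ⟨a1,a2,a3,a4⟩ := hq'G; omega,
              by obtain ⟨a1,a2,a3,a4⟩ := hq'G; omega, hfalse, hcell⟩
          have hq'mem : q' ∈ V0 ∪ M := (hRep.2.2 q' hq'.2.1).mp hget
          exact Finset.union_subset_union (Finset.Subset.refl V0) hMM' hq'mem
        · exact r6 e he q' hq' h1 h2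

-- ===== the BFS loop of A computes the component of s =====
lemma pvBfsA_spec (gm : List String) (w h : Int) (V0 : Finset (Int × Int)) (s : Int × Int)
    (hV0G : ∀ p ∈ V0, pvInG w h p) (hV0C : ∀ a ∈ V0, ∀ b, pvAdj gm w h a b → b ∈ V0)
    (hs : pvInG w h s) (hsV0 : s ∉ V0) :
    ∀ (fuel : Nat) (checked : List (List Bool)) (Q : List (Int × Int)) (count : Int)
      (M : Finset (Int × Int)),
      pvRepA w h checked (V0 ∪ M) →
      s ∈ M → (∀ p ∈ M, pvReach gm w h s p) → (∀ p ∈ Q, p ∈ M) →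
      (∀ p ∈ M, p ∉ Q → ∀ q, pvAdj gm w h p q → q ∈ V0 ∪ M) →
      2 * (h.toNat * w.toNat - (V0 ∪ M).card) + Q.length ≤ fuel →
      ∃ (M' : Finset (Int × Int)) (checked' : List (List Bool)),
        M ⊆ M' ∧ (∀ p, p ∈ M' ↔ pvReach gm w h s p) ∧
        pvRepA w h checked' (V0 ∪ M') ∧
        pvBfsA gm w h fuel checked Q count = (count - M.card + M'.card, checked') := by
  intro fuel
  induction fuel with
  | zero =>
      intro checked Q count M hRep hsM hMr hQM hCl hfuel
      have hQ : Q = [] := List.eq_nil_of_length_eq_zero (by omega)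
      subst hQ
      refine ⟨M, checked, Finset.Subset.refl M, ?_, hRep, by simp [pvBfsA]⟩
      intro p
      exact ⟨fun hp => hMr p hp,
        fun hp => pvReach_subset gm w h hV0C hsV0 hsM
          (fun a ha b hb => hCl a ha (List.not_mem_nil) b hb) p hp⟩
  | succ fuel ih =>
      intro checked Q count M hRep hsM hMr hQM hCl hfuel
      match Q with
      | [] =>
          refine ⟨M, checked, Finset.Subset.refl M, ?_, hRep, by simp [pvBfsA]⟩
          intro p
          exact ⟨fun hp => hMr p hp,
            fun hp => pvReach_subset gm w h hV0C hsV0 hsM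
              (fun a ha b hb => hCl a ha (List.not_mem_nil) b hb) p hp⟩
      | (y, x) :: rest =>
          have hp0M : (y, x) ∈ M := hQM _ List.mem_cons_self
          have hp0r : pvReach gm w h s (y, x) := hMr _ hp0M
          obtain ⟨M1, hMM1, hM1r, hrest⟩ :=
            pvFoldA gm w h V0 s (y, x) hV0C hV0G hs hp0r pvDirections
              (fun d hd => hd) checked rest count M hRep hMr
              (fun p hp => hQM p (List.mem_cons_of_mem _ hp))
              (by
                intro p hp hpQ hpp0 q hq
                exact hCl p hp (by
                  intro hc
                  rcases List.mem_cons.mp hc with hc | hc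
                  · exact hpp0 hc
                  · exact hpQ hc) q hq)
          simp only at hrest
          obtain ⟨r1, r2, r3, r4, r5, r6⟩ := hrest
          set st := List.foldl (pvVisitA gm w h y x) (checked, rest, count) pvDirections with hst
          have hCl1 : ∀ p ∈ M1, p ∉ st.2.1 → ∀ q, pvAdj gm w h p q → q ∈ V0 ∪ M1 := by
            intro p hp hpQ q hq
            by_cases hpp0 : p = (y, x)
            · rw [hpp0] at hq
              exact r6 (q.1 - (y, x).1, q.2 - (y, x).2) hq.2.2.1 q hq rfl rfl
            · exact r3 p hp hpQ hpp0 q hq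
          have hM1s : s ∈ M1 := hMM1 hsM
          have hfuel1 : 2 * (h.toNat * w.toNat - (V0 ∪ M1).card) + st.2.1.length ≤ fuel := by
            have := r5
            simp only [List.length_cons] at hfuel
            omega
          obtain ⟨M', checked', hsub', hiff', hRep', heq'⟩ :=
            ih st.1 st.2.1 st.2.2 M1 r1 hM1s hM1r r2 hCl1 hfuel1
          refine ⟨M', checked', Finset.Subset.trans hMM1 hsub', hiff', hRep', ?_⟩
          show pvBfsA gm w h (fuel + 1) checked ((y, x) :: rest) count = _
          rw [pvBfsA]
          rw [← hst, heq',
            show st.2.2 - (M1.card : Int) + M'.card = count - M.card + M'.card from by omega]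

-- ===== union-find machinery (B side) =====

def pvIdx (w : Int) (p : Int × Int) : Int := p.1 * w + p.2

def pvParL (parent : List Int) (i : Int) : Int := PySem.List.pyGetD parent i i

def pvRoot (parent : List Int) (i : Int) : Int := pvFind parent parent.length i

-- the union-find shape invariant: parent has one entry per cell and parent[i] ≤ i
def pvUF (n : Int) (parent : List Int) : Prop :=
  parent.length = n.toNat ∧
    ∀ i : Int, 0 ≤ i → i < n → 0 ≤ pvParL parent i ∧ pvParL parent i ≤ i

-- parent represents the equivalence generated by S: equal roots ↔ related
def pvUFrep (n : Int) (parent : List Int) (S : Int → Int → Prop) : Prop :=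
  pvUF n parent ∧
    ∀ i j : Int, 0 ≤ i → i < n → 0 ≤ j → j < n →
      (pvRoot parent i = pvRoot parent j ↔ Relation.EqvGen S i j)

lemma pvFind_succ (parent : List Int) (k : Nat) (i : Int) :
    pvFind parent (k + 1) i =
      if pvParL parent i ≠ i then pvFind parent k (pvParL parent i) else i := rfl

lemma pvFind_stable (n : Int) (parent : List Int) (hUF : pvUF n parent) :
    ∀ (N : Nat) (i : Int) (k₁ k₂ : Nat), 0 ≤ i → i < n → i.toNat ≤ N →
      i.toNat < k₁ → i.toNat < k₂ → pvFind parent k₁ i = pvFind parent k₂ i := by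
  intro N
  induction N with
  | zero =>
      intro i k₁ k₂ h0 hn hN h1 h2
      have hi : i = 0 := by omega
      subst hi
      obtain ⟨hp0, hp1⟩ := hUF.2 0 le_rfl hn
      have hfix : pvParL parent 0 = 0 := by omega
      obtain ⟨a, rfl⟩ : ∃ a, k₁ = a + 1 := ⟨k₁ - 1, by omega⟩
      obtain ⟨b, rfl⟩ : ∃ b, k₂ = b + 1 := ⟨k₂ - 1, by omega⟩
      rw [pvFind_succ, pvFind_succ, if_neg (by simp [hfix]), if_neg (by simp [hfix])]
  | succ N ih =>
      intro i k₁ k₂ h0 hn hN h1 h2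
      obtain ⟨a, rfl⟩ : ∃ a, k₁ = a + 1 := ⟨k₁ - 1, by omega⟩
      obtain ⟨b, rfl⟩ : ∃ b, k₂ = b + 1 := ⟨k₂ - 1, by omega⟩
      rw [pvFind_succ, pvFind_succ]
      by_cases hfix : pvParL parent i = i
      · rw [if_neg (by simp [hfix]), if_neg (by simp [hfix])]
      · obtain ⟨hp0, hp1⟩ := hUF.2 i h0 hn
        have hlt : pvParL parent i < i := by omega
        rw [if_pos (by simpa using hfix), if_pos (by simpa using hfix)]
        exact ih (pvParL parent i) a b hp0 (by omega) (by omega) (by omega) (by omega)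

lemma pvRoot_eq_find (n : Int) (parent : List Int) (hUF : pvUF n parent)
    (i : Int) (h0 : 0 ≤ i) (hn : i < n) (k : Nat) (hk : i.toNat < k) :
    pvFind parent k i = pvRoot parent i := by
  have hlen : i.toNat < parent.length := by rw [hUF.1]; omega
  exact pvFind_stable n parent hUF i.toNat i k parent.length h0 hn le_rfl hk hlen

lemma pvRoot_step (n : Int) (parent : List Int) (hUF : pvUF n parent)
    (i : Int) (h0 : 0 ≤ i) (hn : i < n) :
    pvRoot parent i = if pvParL parent i = i then i else pvRoot parent (pvParL parent i) := by
  have hlen : i.toNat < parent.length := by rw [hUF.1]; omega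
  obtain ⟨k, hk⟩ : ∃ k, parent.length = k + 1 := ⟨parent.length - 1, by omega⟩
  obtain ⟨hp0, hp1⟩ := hUF.2 i h0 hn
  by_cases hfix : pvParL parent i = i
  · rw [if_pos hfix]
    show pvFind parent parent.length i = i
    rw [hk, pvFind_succ, if_neg (by simp [hfix])]
  · rw [if_neg hfix]
    show pvFind parent parent.length i = _
    rw [hk, pvFind_succ, if_pos (by simpa using hfix)]
    have hlt : pvParL parent i < i := by omega
    exact pvRoot_eq_find n parent hUF (pvParL parent i) hp0 (by omega) k (by omega)

lemma pvRoot_spec (n : Int) (parent : List Int) (hUF : pvUF n parent) :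
    ∀ (i : Int), 0 ≤ i → i < n →
      0 ≤ pvRoot parent i ∧ pvRoot parent i ≤ i ∧
        pvParL parent (pvRoot parent i) = pvRoot parent i := by
  suffices H : ∀ (N : Nat) (i : Int), 0 ≤ i → i < n → i.toNat ≤ N →
      0 ≤ pvRoot parent i ∧ pvRoot parent i ≤ i ∧
        pvParL parent (pvRoot parent i) = pvRoot parent i by
    intro i h0 hn; exact H i.toNat i h0 hn le_rfl
  intro N
  induction N with
  | zero =>
      intro i h0 hn hN
      have hi : i = 0 := by omega
      subst hi
      obtain ⟨hp0, hp1⟩ := hUF.2 0 le_rfl hn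
      have hfix : pvParL parent 0 = 0 := by omega
      rw [pvRoot_step n parent hUF 0 le_rfl hn, if_pos hfix]
      exact ⟨le_rfl, le_rfl, hfix⟩
  | succ N ih =>
      intro i h0 hn hN
      rw [pvRoot_step n parent hUF i h0 hn]
      by_cases hfix : pvParL parent i = i
      · rw [if_pos hfix]; exact ⟨h0, le_rfl, hfix⟩
      · rw [if_neg hfix]
        obtain ⟨hp0, hp1⟩ := hUF.2 i h0 hn
        have hlt : pvParL parent i < i := by omega
        obtain ⟨a1, a2, a3⟩ := ih (pvParL parent i) hp0 (by omega) (by omega)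
        exact ⟨a1, by omega, a3⟩

lemma pvRoot_fix (n : Int) (parent : List Int) (hUF : pvUF n parent)
    (i : Int) (h0 : 0 ≤ i) (hn : i < n) (hfix : pvParL parent i = i) :
    pvRoot parent i = i := by
  rw [pvRoot_step n parent hUF i h0 hn, if_pos hfix]

lemma pvRoot_idem (n : Int) (parent : List Int) (hUF : pvUF n parent)
    (i : Int) (h0 : 0 ≤ i) (hn : i < n) :
    pvRoot parent (pvRoot parent i) = pvRoot parent i := by
  obtain ⟨a1, a2, a3⟩ := pvRoot_spec n parent hUF i h0 hn
  exact pvRoot_fix n parent hUF _ a1 (by omega) a3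

lemma pvLen_pySetD (parent : List Int) (m : Int) (r : Int) (hm : 0 ≤ m) :
    (PySem.List.pySetD parent m r).length = parent.length := by
  rw [PySem.List.pySetD_of_nonneg _ _ hm, List.length_set]

lemma pvParL_pySetD (parent : List Int) (m r k : Int) (hm0 : 0 ≤ m)
    (hml : m.toNat < parent.length) (hk0 : 0 ≤ k) :
    pvParL (PySem.List.pySetD parent m r) k = if k = m then r else pvParL parent k := by
  rw [pvParL, pvParL, PySem.List.pySetD_of_nonneg _ _ hm0,
    PySem.List.pyGetD_of_nonneg _ _ hk0, PySem.List.pyGetD_of_nonneg _ _ hk0,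
    List.getD_eq_getElem?_getD, List.getD_eq_getElem?_getD]
  by_cases hkm : k = m
  · subst hkm
    rw [if_pos rfl, List.getElem?_set_self hml, Option.getD_some]
  · have : m.toNat ≠ k.toNat := by omega
    rw [if_neg hkm, List.getElem?_set_ne this]

-- linking root m below root r (r < m) relabels exactly the class of m
lemma pvRoot_set (n : Int) (parent : List Int) (hUF : pvUF n parent)
    (r m : Int) (hr0 : 0 ≤ r) (hrm : r < m) (hmn : m < n)
    (hfr : pvParL parent r = r) (hfm : pvParL parent m = m) :
    pvUF n (PySem.List.pySetD parent m r) ∧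
      ∀ i : Int, 0 ≤ i → i < n →
        pvRoot (PySem.List.pySetD parent m r) i =
          if pvRoot parent i = m then r else pvRoot parent i := by
  have hm0 : (0 : Int) ≤ m := by omega
  have hml : m.toNat < parent.length := by rw [hUF.1]; omega
  have hlen : (PySem.List.pySetD parent m r).length = parent.length :=
    pvLen_pySetD parent m r hm0
  have hpar' : ∀ k : Int, 0 ≤ k →
      pvParL (PySem.List.pySetD parent m r) k = if k = m then r else pvParL parent k :=
    fun k hk0 => pvParL_pySetD parent m r k hm0 hml hk0
  have hUF' : pvUF n (PySem.List.pySetD parent m r) := by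
    refine ⟨by rw [hlen, hUF.1], fun i h0 hn => ?_⟩
    rw [hpar' i h0]
    by_cases him : i = m
    · rw [if_pos him]; omega
    · rw [if_neg him]; exact hUF.2 i h0 hn
  refine ⟨hUF', ?_⟩
  suffices H : ∀ (N : Nat) (i : Int), 0 ≤ i → i < n → i.toNat ≤ N →
      pvRoot (PySem.List.pySetD parent m r) i =
        if pvRoot parent i = m then r else pvRoot parent i by
    intro i h0 hn; exact H i.toNat i h0 hn le_rfl
  intro N
  induction N with
  | zero =>
      intro i h0 hn hN
      have hi : i = 0 := by omega
      subst hi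
      obtain ⟨hp0, hp1⟩ := hUF.2 0 le_rfl hn
      have hfix : pvParL parent 0 = 0 := by omega
      have h0m : (0 : Int) ≠ m := by omega
      rw [pvRoot_fix n parent hUF 0 le_rfl hn hfix, if_neg h0m,
        pvRoot_fix n _ hUF' 0 le_rfl hn (by rw [hpar' 0 le_rfl, if_neg h0m]; exact hfix)]
  | succ N ih =>
      intro i h0 hn hN
      by_cases him : i = m
      · have hfmi : pvParL parent i = i := by rw [him]; exact hfm
        have hrm' : pvRoot parent i = i := pvRoot_fix n parent hUF i h0 hn hfmi
        rw [hrm', if_pos him]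
        rw [pvRoot_step n _ hUF' i h0 hn, hpar' i h0, if_pos him, if_neg (by omega)]
        have hrfix' : pvParL (PySem.List.pySetD parent m r) r = r := by
          rw [hpar' r hr0, if_neg (by omega)]; exact hfr
        exact pvRoot_fix n _ hUF' r hr0 (by omega) hrfix'
      · rw [pvRoot_step n _ hUF' i h0 hn, hpar' i h0, if_neg him]
        by_cases hfix : pvParL parent i = i
        · rw [if_pos hfix]
          rw [pvRoot_fix n parent hUF i h0 hn hfix, if_neg him]
        · rw [if_neg hfix]
          obtain ⟨hp0, hp1⟩ := hUF.2 i h0 hn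
          have hlt : pvParL parent i < i := by omega
          rw [ih (pvParL parent i) hp0 (by omega) (by omega)]
          rw [pvRoot_step n parent hUF i h0 hn, if_neg hfix]

-- ===== generic EqvGen facts instantiated for Int =====

lemma pvEqvGen_false (i j : Int) : Relation.EqvGen (fun _ _ => False) i j ↔ i = j := by
  constructor
  · intro hij
    induction hij with
    | rel x y hxy => exact absurd hxy id
    | refl x => rfl
    | symm x y _ ih => exact ih.symm
    | trans x y z _ _ ih1 ih2 => exact ih1.trans ih2
  · rintro rfl
    exact Relation.EqvGen.refl i

lemma pvEqvGen_push (S : Int → Int → Prop) (a b i j : Int) :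
    Relation.EqvGen (fun i j => S i j ∨ (i = a ∧ j = b)) i j ↔
      (Relation.EqvGen S i j ∨
        (Relation.EqvGen S i a ∧ Relation.EqvGen S b j) ∨
        (Relation.EqvGen S i b ∧ Relation.EqvGen S a j)) := by
  constructor
  · intro hij
    induction hij with
    | rel x y hxy =>
        rcases hxy with hxy | ⟨rfl, rfl⟩
        · exact Or.inl (Relation.EqvGen.rel _ _ hxy)
        · exact Or.inr (Or.inl ⟨Relation.EqvGen.refl _, Relation.EqvGen.refl _⟩)
    | refl x => exact Or.inl (Relation.EqvGen.refl x)
    | symm x y _ ih =>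
        rcases ih with h1 | ⟨h1, h2⟩ | ⟨h1, h2⟩
        · exact Or.inl (h1.symm _ _)
        · exact Or.inr (Or.inr ⟨h2.symm _ _, h1.symm _ _⟩)
        · exact Or.inr (Or.inl ⟨h2.symm _ _, h1.symm _ _⟩)
    | trans x y z _ _ ih1 ih2 =>
        rcases ih1 with h1 | ⟨h1, h2⟩ | ⟨h1, h2⟩ <;>
          rcases ih2 with g1 | ⟨g1, g2⟩ | ⟨g1, g2⟩
        · exact Or.inl (h1.trans _ _ _ g1)
        · exact Or.inr (Or.inl ⟨h1.trans _ _ _ g1, g2⟩)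
        · exact Or.inr (Or.inr ⟨h1.trans _ _ _ g1, g2⟩)
        · exact Or.inr (Or.inl ⟨h1, h2.trans _ _ _ g1⟩)
        · exact Or.inr (Or.inl ⟨h1, g2⟩)
        · exact Or.inl (h1.trans _ _ _ g2)
        · exact Or.inr (Or.inr ⟨h1, h2.trans _ _ _ g1⟩)
        · exact Or.inl (h1.trans _ _ _ g2)
        · exact Or.inr (Or.inr ⟨h1, g2⟩)
  · intro hij
    have hrel : Relation.EqvGen (fun i j => S i j ∨ (i = a ∧ j = b)) a b :=
      Relation.EqvGen.rel _ _ (Or.inr ⟨rfl, rfl⟩)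
    have hmono : ∀ {u v : Int}, Relation.EqvGen S u v →
        Relation.EqvGen (fun i j => S i j ∨ (i = a ∧ j = b)) u v :=
      fun h => Relation.EqvGen.mono (fun _ _ hs => Or.inl hs) h
    rcases hij with h1 | ⟨h1, h2⟩ | ⟨h1, h2⟩
    · exact hmono h1
    · exact ((hmono h1).trans _ _ _ hrel).trans _ _ _ (hmono h2)
    · exact ((hmono h1).trans _ _ _ (hrel.symm _ _)).trans _ _ _ (hmono h2)

lemma pvUFrep_congr (n : Int) (parent : List Int) (S T : Int → Int → Prop)
    (h : ∀ i j, S i j ↔ T i j) (hrep : pvUFrep n parent S) : pvUFrep n parent T := by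
  refine ⟨hrep.1, fun i j h1 h2 h3 h4 => ?_⟩
  rw [hrep.2 i j h1 h2 h3 h4]
  exact ⟨Relation.EqvGen.mono (fun a b => (h a b).mp),
    Relation.EqvGen.mono (fun a b => (h a b).mpr)⟩

-- ===== union preserves the representation invariant =====

lemma pvUnion_spec (n : Int) (parent : List Int) (S : Int → Int → Prop)
    (hrep : pvUFrep n parent S) (a b : Int)
    (ha0 : 0 ≤ a) (han : a < n) (hb0 : 0 ≤ b) (hbn : b < n) :
    pvUFrep n (pvUnion parent a b) (fun i j => S i j ∨ (i = a ∧ j = b)) := by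
  obtain ⟨hUF, hEq⟩ := hrep
  obtain ⟨hra0, hraa, hfra⟩ := pvRoot_spec n parent hUF a ha0 han
  obtain ⟨hrb0, hrbb, hfrb⟩ := pvRoot_spec n parent hUF b hb0 hbn
  have hun : pvUnion parent a b =
      if pvRoot parent a ≠ pvRoot parent b then
        if pvRoot parent a < pvRoot parent b then
          PySem.List.pySetD parent (pvRoot parent b) (pvRoot parent a)
        else PySem.List.pySetD parent (pvRoot parent a) (pvRoot parent b)
      else parent := rfl
  by_cases hcase : pvRoot parent a = pvRoot parent b
  · rw [hun, if_neg (by simpa using hcase)]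
    have hab : Relation.EqvGen S a b := (hEq a b ha0 han hb0 hbn).mp hcase
    refine ⟨hUF, fun i j h1 h2 h3 h4 => ?_⟩
    rw [hEq i j h1 h2 h3 h4, pvEqvGen_push S a b i j]
    constructor
    · exact Or.inl
    · rintro (h' | ⟨h1', h2'⟩ | ⟨h1', h2'⟩)
      · exact h'
      · exact (h1'.trans _ _ _ hab).trans _ _ _ h2'
      · exact (h1'.trans _ _ _ (hab.symm _ _)).trans _ _ _ h2'
  · rcases lt_or_gt_of_ne hcase with hlt | hlt
    · -- ra < rb : parent[rb] := ra
      rw [hun, if_pos (by simpa using hcase), if_pos hlt]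
      obtain ⟨hUF', hroot'⟩ := pvRoot_set n parent hUF (pvRoot parent a) (pvRoot parent b)
        hra0 hlt (by omega) hfra hfrb
      refine ⟨hUF', fun i j h1 h2 h3 h4 => ?_⟩
      rw [hroot' i h1 h2, hroot' j h3 h4, pvEqvGen_push S a b i j,
        ← hEq i j h1 h2 h3 h4, ← hEq i a h1 h2 ha0 han, ← hEq b j hb0 hbn h3 h4,
        ← hEq i b h1 h2 hb0 hbn, ← hEq a j ha0 han h3 h4]
      constructor
      · intro h'
        split_ifs at h' <;> omega
      · intro h'
        split_ifs <;> omega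
    · -- rb < ra : parent[ra] := rb
      rw [hun, if_pos (by simpa using hcase), if_neg (by omega)]
      obtain ⟨hUF', hroot'⟩ := pvRoot_set n parent hUF (pvRoot parent b) (pvRoot parent a)
        hrb0 hlt (by omega) hfrb hfra
      refine ⟨hUF', fun i j h1 h2 h3 h4 => ?_⟩
      rw [hroot' i h1 h2, hroot' j h3 h4, pvEqvGen_push S a b i j,
        ← hEq i j h1 h2 h3 h4, ← hEq i a h1 h2 ha0 han, ← hEq b j hb0 hbn h3 h4,
        ← hEq i b h1 h2 hb0 hbn, ← hEq a j ha0 han h3 h4]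
      constructor
      · intro h'
        split_ifs at h' <;> omega
      · intro h'
        split_ifs <;> omega

lemma pvFoldUnion (n : Int) :
    ∀ (l : List (Int × Int)) (parent : List Int) (S : Int → Int → Prop),
      pvUFrep n parent S →
      (∀ e ∈ l, 0 ≤ e.1 ∧ e.1 < n ∧ 0 ≤ e.2 ∧ e.2 < n) →
      pvUFrep n (l.foldl (fun par e => pvUnion par e.1 e.2) parent)
        (fun i j => S i j ∨ (i, j) ∈ l) := by
  intro l
  induction l with
  | nil =>
      intro parent S hrep _
      exact pvUFrep_congr n parent S _ (fun i j => by simp) hrep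
  | cons e t ih =>
      intro parent S hrep hl
      obtain ⟨he1, he2, he3, he4⟩ := hl e List.mem_cons_self
      rw [List.foldl_cons]
      have step := pvUnion_spec n parent S hrep e.1 e.2 he1 he2 he3 he4
      have hrec := ih (pvUnion parent e.1 e.2) _ step
        (fun e' he' => hl e' (List.mem_cons_of_mem _ he'))
      refine pvUFrep_congr n _ _ _ (fun i j => ?_) hrec
      simp only [List.mem_cons, Prod.ext_iff]
      tauto

-- ===== the edge list B's union pass processes =====

def pvEdges (gm : List String) (w h : Int) : List (Int × Int) :=
  (PySem.List.pyRange 0 h 1).flatMap (fun y =>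
    (PySem.List.pyRange 0 w 1).flatMap (fun x =>
      (([(y, x + 1), (y + 1, x)] : List (Int × Int)).filter
        (fun q => decide (q.1 < h ∧ q.2 < w ∧ pvCell gm q.1 q.2 = pvCell gm y x))).map
        (fun q => (y * w + x, q.1 * w + q.2))))

lemma pvUStep_fold (gm : List String) (w h y x : Int) (par : List Int) :
    ([(y, x + 1), (y + 1, x)] : List (Int × Int)).foldl (pvUStep gm w h y x) par =
      ((([(y, x + 1), (y + 1, x)] : List (Int × Int)).filter
        (fun q => decide (q.1 < h ∧ q.2 < w ∧ pvCell gm q.1 q.2 = pvCell gm y x))).map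
        (fun q => (y * w + x, q.1 * w + q.2))).foldl
          (fun par e => pvUnion par e.1 e.2) par := by
  by_cases hg1 : y < h ∧ x + 1 < w ∧ pvCell gm y (x + 1) = pvCell gm y x <;>
    by_cases hg2 : y + 1 < h ∧ x < w ∧ pvCell gm (y + 1) x = pvCell gm y x <;>
      simp [pvUStep, hg1, hg2, List.filter, List.foldl]

lemma pvUnionPhase (gm : List String) (w h : Int) :
    pvParentF gm w h =
      (pvEdges gm w h).foldl (fun par e => pvUnion par e.1 e.2)
        (PySem.List.pyRange 0 (w * h) 1) := by
  rw [pvParentF, pvEdges, List.foldl_flatMap]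
  apply PySem.List.foldl_congr_mem
  intro par y hy
  rw [List.foldl_flatMap]
  apply PySem.List.foldl_congr_mem
  intro par' x hx
  exact pvUStep_fold gm w h y x par'

lemma pvIdx_bounds (w h : Int) (p : Int × Int) (hp : pvInG w h p) :
    0 ≤ pvIdx w p ∧ pvIdx w p < w * h := by
  obtain ⟨h1, h2, h3, h4⟩ := hp
  have hw : 0 < w := by omega
  constructor
  · have := mul_nonneg h1 (le_of_lt hw)
    unfold pvIdx; omega
  · have e1 : (p.1 + 1) * w ≤ h * w :=
      mul_le_mul_of_nonneg_right (by omega) (le_of_lt hw)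
    have e2 : (p.1 + 1) * w = p.1 * w + w := by ring
    have e3 : h * w = w * h := by ring
    unfold pvIdx; omega

lemma pvIdx_inj (w h : Int) (p q : Int × Int) (hp : pvInG w h p) (hq : pvInG w h q)
    (he : pvIdx w p = pvIdx w q) : p = q := by
  obtain ⟨h1, h2, h3, h4⟩ := hp
  obtain ⟨g1, g2, g3, g4⟩ := hq
  unfold pvIdx at he
  have key : p.1 = q.1 := by
    by_contra hne
    rcases lt_or_gt_of_ne hne with hlt | hlt
    · have e1 : (p.1 + 1) * w ≤ q.1 * w :=
        mul_le_mul_of_nonneg_right (by omega) (by omega)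
      have e2 : (p.1 + 1) * w = p.1 * w + w := by ring
      omega
    · have e1 : (q.1 + 1) * w ≤ p.1 * w :=
        mul_le_mul_of_nonneg_right (by omega) (by omega)
      have e2 : (q.1 + 1) * w = q.1 * w + w := by ring
      omega
  have : p.2 = q.2 := by rw [key] at he; omega
  exact Prod.ext key this

-- every processed edge is a same-letter right/down adjacency, and conversely
lemma pvEdges_sub (gm : List String) (w h : Int) (e : Int × Int)
    (he : e ∈ pvEdges gm w h) :
    ∃ p q : Int × Int, pvInG w h p ∧ pvInG w h q ∧ pvAdj gm w h p q ∧
      e = (pvIdx w p, pvIdx w q) := by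
  simp only [pvEdges, List.mem_flatMap, List.mem_map, List.mem_filter,
    PySem.List.mem_pyRange_one, List.mem_cons, List.not_mem_nil, or_false,
    decide_eq_true_eq] at he
  obtain ⟨y, ⟨hy0, hyh⟩, x, ⟨hx0, hxw⟩, q, ⟨hq12, hq1, hq2, hqc⟩, rfl⟩ := he
  have hpG : pvInG w h (y, x) := ⟨hy0, hyh, hx0, hxw⟩
  have hqG : pvInG w h q := by
    rcases hq12 with rfl | rfl <;> exact ⟨by omega, hq1, by omega, hq2⟩
  refine ⟨(y, x), q, hpG, hqG, ⟨hpG, hqG, ?_, hqc⟩, rfl⟩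
  rcases hq12 with rfl | rfl <;>
    simp only [pvDirections, List.mem_cons, List.not_mem_nil, or_false, Prod.mk.injEq] <;>
      omega

lemma pvEdges_has (gm : List String) (w h : Int) (p q : Int × Int)
    (hadj : pvAdj gm w h p q)
    (hd : q = (p.1, p.2 + 1) ∨ q = (p.1 + 1, p.2)) :
    (pvIdx w p, pvIdx w q) ∈ pvEdges gm w h := by
  obtain ⟨hpG, hqG, _, hcell⟩ := hadj
  obtain ⟨h1, h2, h3, h4⟩ := hpG
  obtain ⟨g1, g2, g3, g4⟩ := hqG
  simp only [pvEdges, List.mem_flatMap, List.mem_map, List.mem_filter,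
    PySem.List.mem_pyRange_one, List.mem_cons, List.not_mem_nil, or_false,
    decide_eq_true_eq]
  refine ⟨p.1, ⟨h1, h2⟩, p.2, ⟨h3, h4⟩, q, ⟨?_, g2, g4, hcell⟩, rfl⟩
  rcases hd with rfl | rfl
  · exact Or.inl rfl
  · exact Or.inr rfl

-- ===== the classes of the final parent array are the connected components =====

lemma pvReach_to_eqv (gm : List String) (w h : Int) (p q : Int × Int)
    (hr : pvReach gm w h p q) :
    Relation.EqvGen (fun i j => (i, j) ∈ pvEdges gm w h) (pvIdx w p) (pvIdx w q) := by
  induction hr with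
  | refl => exact Relation.EqvGen.refl _
  | @tail b c _ hbc ih =>
      refine ih.trans _ _ _ ?_
      have hd := hbc.2.2.1
      simp only [pvDirections, List.mem_cons, List.not_mem_nil, or_false,
        Prod.mk.injEq] at hd
      rcases hd with ⟨d1, d2⟩ | ⟨d1, d2⟩ | ⟨d1, d2⟩ | ⟨d1, d2⟩
      · exact Relation.EqvGen.rel _ _ (pvEdges_has gm w h b c hbc
          (Or.inl (Prod.ext (show c.1 = b.1 by omega) (show c.2 = b.2 + 1 by omega))))
      · exact Relation.EqvGen.rel _ _ (pvEdges_has gm w h b c hbc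
          (Or.inr (Prod.ext (show c.1 = b.1 + 1 by omega) (show c.2 = b.2 by omega))))
      · exact (Relation.EqvGen.rel _ _ (pvEdges_has gm w h c b (pvAdj_symm gm w h hbc)
          (Or.inl (Prod.ext (show b.1 = c.1 by omega) (show b.2 = c.2 + 1 by omega))))).symm _ _
      · exact (Relation.EqvGen.rel _ _ (pvEdges_has gm w h c b (pvAdj_symm gm w h hbc)
          (Or.inr (Prod.ext (show b.1 = c.1 + 1 by omega) (show b.2 = c.2 by omega))))).symm _ _

lemma pvEqv_to_reach (gm : List String) (w h : Int) (i j : Int)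
    (hij : Relation.EqvGen (fun i j => (i, j) ∈ pvEdges gm w h) i j) :
    i = j ∨ ∃ p q : Int × Int, pvInG w h p ∧ pvInG w h q ∧ i = pvIdx w p ∧ j = pvIdx w q ∧
      pvReach gm w h p q := by
  induction hij with
  | rel x y hxy =>
      obtain ⟨p, q, hp, hq, hadj, he⟩ := pvEdges_sub gm w h (x, y) hxy
      right
      exact ⟨p, q, hp, hq, congrArg Prod.fst he, congrArg Prod.snd he,
        Relation.ReflTransGen.single hadj⟩
  | refl x => exact Or.inl rfl
  | symm x y _ ih =>
      rcases ih with rfl | ⟨p, q, hp, hq, e1, e2, hr⟩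
      · exact Or.inl rfl
      · exact Or.inr ⟨q, p, hq, hp, e2, e1,
          Relation.ReflTransGen.symmetric (pvAdj_symm gm w h) hr⟩
  | trans x y z _ _ ih1 ih2 =>
      rcases ih1 with rfl | ⟨p, q, hp, hq, e1, e2, hr⟩
      · exact ih2
      · rcases ih2 with rfl | ⟨p', q', hp', hq', e1', e2', hr'⟩
        · exact Or.inr ⟨p, q, hp, hq, e1, e2, hr⟩
        · have : q = p' := pvIdx_inj w h q p' hq hp' (by omega)
          subst this
          exact Or.inr ⟨p, q', hp, hq', e1, e2', hr.trans hr'⟩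

lemma pvEqv_iff_reach (gm : List String) (w h : Int) (p q : Int × Int)
    (hp : pvInG w h p) (hq : pvInG w h q) :
    Relation.EqvGen (fun i j => (i, j) ∈ pvEdges gm w h) (pvIdx w p) (pvIdx w q) ↔
      pvReach gm w h p q := by
  constructor
  · intro h'
    rcases pvEqv_to_reach gm w h _ _ h' with heq | ⟨p', q', hp', hq', e1, e2, hr⟩
    · rw [pvIdx_inj w h p q hp hq heq]
      exact Relation.ReflTransGen.refl
    · rw [pvIdx_inj w h p p' hp hp' e1, pvIdx_inj w h q q' hq hq' e2]
      exact hr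
  · exact pvReach_to_eqv gm w h p q

-- ===== initial parent array and the phase-1 result =====

lemma pvPyRange_nil (a b : Int) (h : b ≤ a) : PySem.List.pyRange a b 1 = [] := by
  have hl := PySem.List.length_pyRange_one a b
  cases hr : PySem.List.pyRange a b 1 with
  | nil => rfl
  | cons c t =>
      exfalso
      rw [hr] at hl
      simp only [List.length_cons] at hl
      omega

lemma pvParL_init (n i : Int) (h0 : 0 ≤ i) (hn : i < n) :
    pvParL (PySem.List.pyRange 0 n 1) i = i := by
  have hcast_n : ((n.toNat : Nat) : Int) = n := by omega
  have hcast_i : ((i.toNat : Nat) : Int) = i := by omega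
  have hmap : List.map (fun z : Int => z) (PySem.List.pyRange 0 ((n.toNat : Nat) : Int) 1) =
      PySem.List.pyRange 0 ((n.toNat : Nat) : Int) 1 := by simp
  have key := PySem.List.pyGetD_map_pyRange (fun z : Int => z) n.toNat i.toNat i (by omega)
  rw [hmap, hcast_n, hcast_i] at key
  simpa [pvParL] using key

lemma pvUF_init (n : Int) (hn : 0 ≤ n) : pvUF n (PySem.List.pyRange 0 n 1) := by
  refine ⟨by rw [PySem.List.length_pyRange_one]; omega, fun i h0 hin => ?_⟩
  rw [pvParL_init n i h0 hin]
  omega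

lemma pvUFrep_init (n : Int) (hn : 0 ≤ n) :
    pvUFrep n (PySem.List.pyRange 0 n 1) (fun _ _ => False) := by
  have hUF := pvUF_init n hn
  refine ⟨hUF, fun i j h1 h2 h3 h4 => ?_⟩
  rw [pvRoot_fix n _ hUF i h1 h2 (pvParL_init n i h1 h2),
    pvRoot_fix n _ hUF j h3 h4 (pvParL_init n j h3 h4), pvEqvGen_false]

lemma pvParentF_spec (gm : List String) (w h : Int) (hw : 0 < w) (hh : 0 < h) :
    pvUFrep (w * h) (pvParentF gm w h) (fun i j => (i, j) ∈ pvEdges gm w h) := by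
  rw [pvUnionPhase]
  have hbounds : ∀ e ∈ pvEdges gm w h, 0 ≤ e.1 ∧ e.1 < w * h ∧ 0 ≤ e.2 ∧ e.2 < w * h := by
    intro e he
    obtain ⟨p, q, hp, hq, _, rfl⟩ := pvEdges_sub gm w h e he
    obtain ⟨a1, a2⟩ := pvIdx_bounds w h p hp
    obtain ⟨b1, b2⟩ := pvIdx_bounds w h q hq
    exact ⟨a1, a2, b1, b2⟩
  have := pvFoldUnion (w * h) (pvEdges gm w h) (PySem.List.pyRange 0 (w * h) 1)
    (fun _ _ => False) (pvUFrep_init (w * h) (by positivity)) hbounds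
  exact pvUFrep_congr _ _ _ _ (fun i j => by simp) this

-- ===== the row-major cell list both final passes walk =====

def pvCells (w h : Int) : List (Int × Int) :=
  (PySem.List.pyRange 0 h 1).flatMap (fun y =>
    (PySem.List.pyRange 0 w 1).map (fun x => (y, x)))

lemma pvCells_mem (w h : Int) (p : Int × Int) : p ∈ pvCells w h ↔ pvInG w h p := by
  simp only [pvCells, List.mem_flatMap, List.mem_map, PySem.List.mem_pyRange_one, pvInG]
  constructor
  · rintro ⟨y, ⟨hy0, hyh⟩, x, ⟨hx0, hxw⟩, rfl⟩
    exact ⟨hy0, hyh, hx0, hxw⟩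
  · rintro ⟨h1, h2, h3, h4⟩
    exact ⟨p.1, ⟨h1, h2⟩, p.2, ⟨h3, h4⟩, rfl⟩

lemma pvPyRange_nodup (a b : Int) : (PySem.List.pyRange a b 1).Nodup := by
  suffices H : ∀ (N : Nat) (a b : Int), (b - a).toNat ≤ N → (PySem.List.pyRange a b 1).Nodup by
    exact H (b - a).toNat a b le_rfl
  intro N
  induction N with
  | zero =>
      intro a b hN
      rw [pvPyRange_nil a b (by omega)]
      exact List.nodup_nil
  | succ N ih =>
      intro a b hN
      by_cases hab : a < b
      · rw [PySem.List.pyRange_one_cons hab]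
        refine List.Nodup.cons (fun hmem => ?_) (ih (a + 1) b (by omega))
        rw [PySem.List.mem_pyRange_one] at hmem
        omega
      · rw [pvPyRange_nil a b (by omega)]
        exact List.nodup_nil

lemma pvCells_nodup (w h : Int) : (pvCells w h).Nodup := by
  rw [pvCells, List.nodup_flatMap]
  constructor
  · intro y _
    exact (pvPyRange_nodup 0 w).map (fun x x' hxx' => by
      simpa using congrArg Prod.snd hxx')
  · have hnd := pvPyRange_nodup 0 h
    rw [List.nodup_iff_pairwise_ne] at hnd
    refine hnd.imp ?_
    intro y y' hyy' p hp hp'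
    simp only [List.mem_map] at hp hp'
    obtain ⟨x, _, rfl⟩ := hp
    obtain ⟨x', _, he⟩ := hp'
    exact hyy' (by simpa using (congrArg Prod.fst he).symm)

-- ===== the count pass tallies class sizes =====

lemma pvGetD_setD_int (l : List Int) (m v k : Int) (hm0 : 0 ≤ m)
    (hml : m.toNat < l.length) (hk0 : 0 ≤ k) :
    PySem.List.pyGetD (PySem.List.pySetD l m v) k 0 =
      if k = m then v else PySem.List.pyGetD l k 0 := by
  rw [PySem.List.pySetD_of_nonneg _ _ hm0,
    PySem.List.pyGetD_of_nonneg _ _ hk0, PySem.List.pyGetD_of_nonneg _ _ hk0,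
    List.getD_eq_getElem?_getD, List.getD_eq_getElem?_getD]
  by_cases hkm : k = m
  · subst hkm
    rw [if_pos rfl, List.getElem?_set_self hml, Option.getD_some]
  · have : m.toNat ≠ k.toNat := by omega
    rw [if_neg hkm, List.getElem?_set_ne this]

lemma pvCountFold (f : Int × Int → Int) :
    ∀ (l : List (Int × Int)) (cnt : List Int),
      (∀ p ∈ l, 0 ≤ f p ∧ (f p).toNat < cnt.length) →
      ((l.foldl (fun cnt p =>
          PySem.List.pySetD cnt (f p) (PySem.List.pyGetD cnt (f p) 0 + 1)) cnt).length
        = cnt.length ∧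
      ∀ k : Int, 0 ≤ k →
        PySem.List.pyGetD (l.foldl (fun cnt p =>
            PySem.List.pySetD cnt (f p) (PySem.List.pyGetD cnt (f p) 0 + 1)) cnt) k 0 =
          PySem.List.pyGetD cnt k 0 + (l.countP (fun p => f p == k) : Int)) := by
  intro l
  induction l with
  | nil => intro cnt _; simp
  | cons p t ih =>
      intro cnt hl
      obtain ⟨hp0, hpl⟩ := hl p List.mem_cons_self
      have hlen' : (PySem.List.pySetD cnt (f p) (PySem.List.pyGetD cnt (f p) 0 + 1)).length
          = cnt.length := pvLen_pySetD cnt (f p) _ hp0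
      obtain ⟨ihl, ihv⟩ := ih (PySem.List.pySetD cnt (f p) (PySem.List.pyGetD cnt (f p) 0 + 1))
        (fun q hq => by rw [hlen']; exact hl q (List.mem_cons_of_mem _ hq))
      rw [List.foldl_cons]
      refine ⟨by rw [ihl, hlen'], fun k hk0 => ?_⟩
      rw [ihv k hk0, pvGetD_setD_int cnt (f p) _ k hp0 hpl hk0, List.countP_cons]
      by_cases hkp : f p = k
      · rw [if_pos hkp.symm, if_pos (by simp [hkp]), hkp]
        push_cast
        ring
      · rw [if_neg (fun hc => hkp hc.symm), if_neg (by simp [hkp])]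
        push_cast
        ring

lemma pvGetD_replicate (n : Nat) (k : Int) (hk0 : 0 ≤ k) (hkn : k.toNat < n) :
    PySem.List.pyGetD (List.replicate n (0 : Int)) k 0 = 0 := by
  rw [PySem.List.pyGetD_of_nonneg _ _ hk0, List.getD_eq_getElem?_getD,
    List.getElem?_replicate, if_pos hkn, Option.getD_some]

lemma pvCountPhase (gm : List String) (w h : Int) (hw : 0 < w) (hh : 0 < h)
    (hUF : pvUF (w * h) (pvParentF gm w h)) :
    ∀ k : Int, 0 ≤ k → k < w * h →
      PySem.List.pyGetD (pvCountF gm w h) k 0 =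
        ((pvCells w h).countP
          (fun p => pvRoot (pvParentF gm w h) (pvIdx w p) == k) : Int) := by
  intro k hk0 hkn
  have hflat : pvCountF gm w h =
      (pvCells w h).foldl (fun cnt p =>
        PySem.List.pySetD cnt (pvRoot (pvParentF gm w h) (pvIdx w p))
          (PySem.List.pyGetD cnt (pvRoot (pvParentF gm w h) (pvIdx w p)) 0 + 1))
        (List.replicate (w * h).toNat 0) := by
    rw [pvCountF, pvCells, List.foldl_flatMap]
    apply PySem.List.foldl_congr_mem
    intro cnt y hy
    rw [List.foldl_map]
    rfl
  have hb : ∀ p ∈ pvCells w h, 0 ≤ pvRoot (pvParentF gm w h) (pvIdx w p) ∧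
      (pvRoot (pvParentF gm w h) (pvIdx w p)).toNat < (List.replicate (w * h).toNat (0:Int)).length := by
    intro p hp
    have hpG := (pvCells_mem w h p).mp hp
    obtain ⟨b1, b2⟩ := pvIdx_bounds w h p hpG
    obtain ⟨r1, r2, _⟩ := pvRoot_spec (w * h) (pvParentF gm w h) hUF (pvIdx w p) b1 b2
    rw [List.length_replicate]
    omega
  obtain ⟨_, hv⟩ := pvCountFold (fun p => pvRoot (pvParentF gm w h) (pvIdx w p))
    (pvCells w h) (List.replicate (w * h).toNat 0) hb
  rw [hflat, hv k hk0, pvGetD_replicate (w * h).toNat k hk0 (by omega), zero_add]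

lemma pvCountP_card (l : List (Int × Int)) (hnd : l.Nodup) (M : Finset (Int × Int))
    (pred : Int × Int → Bool) (hiff : ∀ p, p ∈ M ↔ (p ∈ l ∧ pred p = true)) :
    (l.countP pred : Int) = (M.card : Int) := by
  have hM : M = (l.filter pred).toFinset := by
    ext q
    rw [List.mem_toFinset, List.mem_filter, hiff]
  rw [hM, List.toFinset_card_of_nodup (hnd.filter pred), List.countP_eq_length_filter]

-- ===== the visited set after processing the first k cells (row-major) =====

def pvVset (w h : Int) (parent : List Int) (k : Int) : Finset (Int × Int) :=
  (pvGridF w h).filter (fun p => pvRoot parent (pvIdx w p) < k)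

lemma pvMem_Vset (w h : Int) (parent : List Int) (k : Int) (p : Int × Int) :
    p ∈ pvVset w h parent k ↔ pvInG w h p ∧ pvRoot parent (pvIdx w p) < k := by
  rw [pvVset, Finset.mem_filter, pvMem_gridF]

-- two same-range loops stepped in lockstep (prefixes of pyRange 0 m)
lemma pvFoldRange2 {α β : Type} (m : Int) (hm : 0 ≤ m) (f : α → Int → α) (g : β → Int → β)
    (P : Nat → α → β → Prop) (a₀ : α) (b₀ : β) (h0 : P 0 a₀ b₀)
    (hstep : ∀ (t : Nat), (t : Int) < m → ∀ a b, P t a b → P (t + 1) (f a t) (g b t)) :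
    P m.toNat ((PySem.List.pyRange 0 m 1).foldl f a₀)
      ((PySem.List.pyRange 0 m 1).foldl g b₀) := by
  suffices H : ∀ t : Nat, (t : Int) ≤ m →
      P t ((PySem.List.pyRange 0 (t : Int) 1).foldl f a₀)
        ((PySem.List.pyRange 0 (t : Int) 1).foldl g b₀) by
    have := H m.toNat (by omega)
    rwa [show ((m.toNat : Nat) : Int) = m from by omega] at this
  intro t
  induction t with
  | zero =>
      intro _
      rw [show ((0 : Nat) : Int) = 0 from rfl, pvPyRange_nil 0 0 le_rfl]
      exact h0
  | succ t ih =>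
      intro ht
      have ht' : (t : Int) ≤ m := by push_cast at ht ⊢; omega
      have hcast : ((t + 1 : Nat) : Int) = (t : Int) + 1 := by push_cast; ring
      rw [hcast, PySem.List.pyRange_one_succ_right (by positivity),
        List.foldl_append, List.foldl_append]
      simp only [List.foldl_cons, List.foldl_nil]
      exact hstep t (by push_cast at ht ⊢; omega) _ _ (ih ht')

-- ===== one cell of the final passes, in lockstep =====

lemma pvStepCell (gm : List String) (w h : Int) (hw : 0 < w) (hh : 0 < h)
    (parent count : List Int)
    (hUF : pvUF (w * h) parent)
    (HR : ∀ p q : Int × Int, pvInG w h p → pvInG w h q →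
      (pvRoot parent (pvIdx w p) = pvRoot parent (pvIdx w q) ↔ pvReach gm w h p q))
    (HC : ∀ c : Int × Int, pvInG w h c → pvRoot parent (pvIdx w c) = pvIdx w c →
      ∀ M : Finset (Int × Int), (∀ p, p ∈ M ↔ pvReach gm w h c p) →
        PySem.List.pyGetD count (pvIdx w c) 0 = (M.card : Int))
    (y x : Int) (hy0 : 0 ≤ y) (hyh : y < h) (hx0 : 0 ≤ x) (hxw : x < w)
    (sa : List (List Bool) × Int × Int) (sb : Int × Int)
    (hRep : pvRepA w h sa.1 (pvVset w h parent (y * w + x)))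
    (h1 : sa.2.1 = sb.1) (h2 : sa.2.2 = sb.2) :
    pvRepA w h (pvAStep gm w h y x sa).1 (pvVset w h parent (y * w + x + 1)) ∧
      (pvAStep gm w h y x sa).2.1 = (pvBStep gm w parent count y x sb).1 ∧
      (pvAStep gm w h y x sa).2.2 = (pvBStep gm w parent count y x sb).2 := by
  have hcG : pvInG w h (y, x) := ⟨hy0, hyh, hx0, hxw⟩
  have hbnd := pvIdx_bounds w h (y, x) hcG
  simp only [pvIdx] at hbnd
  obtain ⟨hi0, hin⟩ := hbnd
  obtain ⟨hr0, hri, hrfix⟩ := pvRoot_spec (w * h) parent hUF (y * w + x) hi0 hin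
  have hfind : pvFind parent parent.length (y * w + x) = pvRoot parent (y * w + x) := rfl
  have hVG : ∀ p ∈ pvVset w h parent (y * w + x), pvInG w h p := fun p hp =>
    ((pvMem_Vset w h parent _ p).mp hp).1
  have hVC : ∀ a ∈ pvVset w h parent (y * w + x), ∀ b, pvAdj gm w h a b →
      b ∈ pvVset w h parent (y * w + x) := by
    intro a ha b hab
    obtain ⟨haG, har⟩ := (pvMem_Vset w h parent _ a).mp ha
    have hbG := hab.2.1
    have heq := (HR a b haG hbG).mpr (Relation.ReflTransGen.single hab)
    exact (pvMem_Vset w h parent _ b).mpr ⟨hbG, by omega⟩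
  by_cases hroot : pvRoot parent (y * w + x) = y * w + x
  · -- (y, x) is its class's root: a fresh component in both programs
    have hnotV : (y, x) ∉ pvVset w h parent (y * w + x) := by
      intro hmem
      have := ((pvMem_Vset w h parent _ _).mp hmem).2
      simp only [pvIdx] at this
      omega
    have hAfalse : pvGet2d sa.1 y x = false := by
      cases hb : pvGet2d sa.1 y x with
      | false => rfl
      | true => exact absurd ((hRep.2.2 (y, x) hcG).mp hb) hnotV
    have hins : pvVset w h parent (y * w + x) ∪ {((y : Int), (x : Int))} =
        insert ((y : Int), (x : Int)) (pvVset w h parent (y * w + x)) := by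
      rw [Finset.union_comm, ← Finset.insert_eq]
    have hfuel0 : 2 * (h.toNat * w.toNat -
        (pvVset w h parent (y * w + x) ∪ {((y : Int), (x : Int))}).card) + 1 ≤
        2 * w.toNat * h.toNat + 1 := by
      have hmc : 2 * w.toNat * h.toNat = 2 * (h.toNat * w.toNat) := by ring
      omega
    obtain ⟨M', checked', hsubA, hiffA, hRepA', heqA⟩ :=
      pvBfsA_spec gm w h (pvVset w h parent (y * w + x)) (y, x) hVG hVC hcG hnotV
        (2 * w.toNat * h.toNat + 1) (pvSet2d sa.1 y x) [(y, x)] 1 {(y, x)}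
        (by rw [hins]; exact pvRepA_insert w h sa.1 _ (y, x) hRep hcG)
        (Finset.mem_singleton_self _)
        (fun p hp => by rw [Finset.mem_singleton.mp hp]; exact Relation.ReflTransGen.refl)
        (fun p hp => by rw [List.mem_singleton.mp hp]; exact Finset.mem_singleton_self _)
        (fun p hp hpQ => absurd (by
          rw [Finset.mem_singleton.mp hp]; exact List.mem_singleton_self _) hpQ)
        hfuel0
    have hcount' : count_adjacent_soldiers gm w h y x sa.1 = ((M'.card : Int), checked') := by
      rw [count_adjacent_soldiers, heqA, Finset.card_singleton]
      norm_num
    have hVnew : pvVset w h parent (y * w + x) ∪ M' = pvVset w h parent (y * w + x + 1) := by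
      ext p
      rw [Finset.mem_union, pvMem_Vset, pvMem_Vset, hiffA p]
      constructor
      · rintro (⟨hg, hr⟩ | hreach)
        · exact ⟨hg, by omega⟩
        · have hpG := pvReach_inG gm w h hcG hreach
          have heq := (HR (y, x) p hcG hpG).mpr hreach
          rw [show pvIdx w ((y : Int), (x : Int)) = y * w + x from rfl] at heq
          refine ⟨hpG, ?_⟩
          omega
      · rintro ⟨hg, hr⟩
        by_cases hlt : pvRoot parent (pvIdx w p) < y * w + x
        · exact Or.inl ⟨hg, hlt⟩
        · right
          refine (HR (y, x) p hcG hg).mp ?_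
          rw [show pvIdx w ((y : Int), (x : Int)) = y * w + x from rfl]
          omega
    have hs : PySem.List.pyGetD count (y * w + x) 0 = (M'.card : Int) := by
      have := HC (y, x) hcG (by simpa [pvIdx] using hroot) M' hiffA
      simpa [pvIdx] using this
    unfold pvAStep pvBStep
    rw [if_pos hAfalse, hcount']
    dsimp only
    rw [hfind, if_pos hroot]
    by_cases hW : pvCell gm y x = 'W'
    · rw [if_pos hW, if_pos hW]
      refine ⟨by rw [← hVnew]; exact hRepA', ?_, h2⟩
      dsimp only
      rw [h1, hs]
      ring
    · rw [if_neg hW, if_neg hW]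
      by_cases hB : pvCell gm y x = 'B'
      · rw [if_pos hB, if_pos hB]
        refine ⟨by rw [← hVnew]; exact hRepA', h1, ?_⟩
        dsimp only
        rw [h2, hs]
        ring
      · rw [if_neg hB, if_neg hB]
        exact ⟨by rw [← hVnew]; exact hRepA', h1, h2⟩
  · -- (y, x) was already swallowed by an earlier component: both programs skip it
    have hinV : (y, x) ∈ pvVset w h parent (y * w + x) :=
      (pvMem_Vset w h parent _ _).mpr ⟨hcG, by simp only [pvIdx]; omega⟩
    have hAtrue : pvGet2d sa.1 y x = true := (hRep.2.2 (y, x) hcG).mpr hinV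
    have hVsame : pvVset w h parent (y * w + x + 1) = pvVset w h parent (y * w + x) := by
      ext p
      rw [pvMem_Vset, pvMem_Vset]
      constructor
      · rintro ⟨hg, hr⟩
        refine ⟨hg, ?_⟩
        rcases lt_or_eq_of_le (by omega : pvRoot parent (pvIdx w p) ≤ y * w + x) with
          hlt | heq
        · exact hlt
        · exfalso
          have hbp := pvIdx_bounds w h p hg
          have hidem := pvRoot_idem (w * h) parent hUF (pvIdx w p) hbp.1 hbp.2
          rw [heq] at hidem
          exact hroot hidem
      · rintro ⟨hg, hr⟩
        exact ⟨hg, by omega⟩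
    unfold pvAStep pvBStep
    dsimp only
    rw [if_neg (by simp [hAtrue]), hfind, if_neg hroot]
    exact ⟨by rw [hVsame]; exact hRep, h1, h2⟩

-- ===== degenerate grids: A returns (0, 0) =====

lemma pvA_degenerate (w h : Int) (gm : List String) (hd : w ≤ 0 ∨ h ≤ 0) :
    calculate_army_power w h gm = (0, 0) := by
  unfold calculate_army_power
  rcases hd with hw' | hh'
  · have hinner : ∀ (st : List (List Bool) × Int × Int) (y : Int),
        (PySem.List.pyRange 0 w 1).foldl (fun st x => pvAStep gm w h y x st) st = st := by
      intro st y
      rw [pvPyRange_nil 0 w hw']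
      rfl
    simp only []
    rw [PySem.List.foldl_congr_mem _ _ (fun st _ => st) _
      (fun acc y _ => hinner acc y), PySem.List.foldl_ignore]
  · simp only []
    rw [pvPyRange_nil 0 h hh']
    rfl

-- ===== VERDICT (by name: the statement is the Claim_ definition above) =====
theorem calculate_army_power_spec : Claim_equal_calculate_army_power := by
  intro w h gm _ _
  unfold Spec_calculate_army_power
  by_cases hd : w ≤ 0 ∨ h ≤ 0
  · rw [pvA_degenerate w h gm hd]
    unfold calculate_army_power_alt
    rw [if_pos hd]
  · push_neg at hd
    obtain ⟨hw0, hh0⟩ := hd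
    have hw : 0 < w := by omega
    have hh : 0 < h := by omega
    have hrep := pvParentF_spec gm w h hw hh
    have hUF := hrep.1
    have HR : ∀ p q : Int × Int, pvInG w h p → pvInG w h q →
        (pvRoot (pvParentF gm w h) (pvIdx w p) = pvRoot (pvParentF gm w h) (pvIdx w q) ↔
          pvReach gm w h p q) := by
      intro p q hp hq
      obtain ⟨a1, a2⟩ := pvIdx_bounds w h p hp
      obtain ⟨b1, b2⟩ := pvIdx_bounds w h q hq
      rw [hrep.2 (pvIdx w p) (pvIdx w q) a1 a2 b1 b2]
      exact pvEqv_iff_reach gm w h p q hp hq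
    have HC : ∀ c : Int × Int, pvInG w h c →
        pvRoot (pvParentF gm w h) (pvIdx w c) = pvIdx w c →
        ∀ M : Finset (Int × Int), (∀ p, p ∈ M ↔ pvReach gm w h c p) →
          PySem.List.pyGetD (pvCountF gm w h) (pvIdx w c) 0 = (M.card : Int) := by
      intro c hc hroot M hM
      obtain ⟨a1, a2⟩ := pvIdx_bounds w h c hc
      rw [pvCountPhase gm w h hw hh hUF (pvIdx w c) a1 a2]
      refine pvCountP_card (pvCells w h) (pvCells_nodup w h) M _ (fun p => ?_)
      rw [hM p, pvCells_mem, beq_iff_eq]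
      constructor
      · intro hreach
        have hpG := pvReach_inG gm w h hc hreach
        have := (HR c p hc hpG).mpr hreach
        exact ⟨hpG, by omega⟩
      · rintro ⟨hpG, hr⟩
        exact (HR c p hc hpG).mp (by omega)
    unfold calculate_army_power calculate_army_power_alt
    rw [if_neg (by omega : ¬(w ≤ 0 ∨ h ≤ 0))]
    simp only []
    have hVempty : pvVset w h (pvParentF gm w h) 0 = ∅ := by
      rw [Finset.eq_empty_iff_forall_notMem]
      intro p hp
      obtain ⟨hpG, hr⟩ := (pvMem_Vset w h (pvParentF gm w h) 0 p).mp hp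
      obtain ⟨a1, a2⟩ := pvIdx_bounds w h p hpG
      obtain ⟨r1, _, _⟩ := pvRoot_spec (w * h) (pvParentF gm w h) hUF (pvIdx w p) a1 a2
      omega
    have hmat : (PySem.List.pyRange 0 h 1).map
        (fun _ => List.replicate w.toNat false) =
        List.replicate h.toNat (List.replicate w.toNat false) := by
      rw [List.map_const', PySem.List.length_pyRange_one]
      norm_num
    have HH := pvFoldRange2 h (le_of_lt hh)
      (fun st y => (PySem.List.pyRange 0 w 1).foldl
        (fun st x => pvAStep gm w h y x st) st)
      (fun st y => (PySem.List.pyRange 0 w 1).foldl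
        (fun st x => pvBStep gm w (pvParentF gm w h) (pvCountF gm w h) y x st) st)
      (fun t sa sb => pvRepA w h sa.1 (pvVset w h (pvParentF gm w h) ((t : Int) * w)) ∧
        sa.2.1 = sb.1 ∧ sa.2.2 = sb.2)
      ((PySem.List.pyRange 0 h 1).map (fun _ => List.replicate w.toNat false),
        (0 : Int), (0 : Int))
      ((0 : Int), (0 : Int))
      (by
        refine ⟨?_, rfl, rfl⟩
        simp only [Nat.cast_zero, zero_mul, hVempty, hmat]
        exact pvRepA_init w h)
      (by
        intro t ht a b hP
        have HI := pvFoldRange2 w (le_of_lt hw)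
          (fun st x => pvAStep gm w h (t : Int) x st)
          (fun st x => pvBStep gm w (pvParentF gm w h) (pvCountF gm w h) (t : Int) x st)
          (fun u sa sb =>
            pvRepA w h sa.1 (pvVset w h (pvParentF gm w h) ((t : Int) * w + (u : Int))) ∧
              sa.2.1 = sb.1 ∧ sa.2.2 = sb.2)
          a b
          (by simpa using hP)
          (by
            intro u hu sa sb hQ
            obtain ⟨q1, q2, q3⟩ := hQ
            have := pvStepCell gm w h hw hh (pvParentF gm w h) (pvCountF gm w h) hUF HR HC
              (t : Int) (u : Int) (by positivity) ht (by positivity) hu sa sb q1 q2 q3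
            have hcast : ((u + 1 : Nat) : Int) = (u : Int) + 1 := by push_cast; ring
            rw [hcast, ← add_assoc]
            exact this)
        have hcast2 : (t : Int) * w + ((w.toNat : Nat) : Int) = ((t + 1 : Nat) : Int) * w := by
          rw [Int.toNat_of_nonneg (le_of_lt hw)]
          push_cast
          ring
        simp only [] at HI
        rw [hcast2] at HI
        exact HI)
    exact Prod.ext HH.2.1 HH.2.2
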